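-- pv_equiv track=rewrite | github.com/nickdecodes/computer_basic_note | 04.数据结构/03.Python/04.algorithm/03.binary_search.py | binary_search3
-- ===== SOURCE A (Python) =====
-- def binary_search3(arr):
--     head = 0
--     tail = len(arr)
--     while head < tail:
--         mid = int((head + tail) / 2)
--         if arr[mid] == 1:
--             tail = mid
--         else:
--             head = mid + 1
--     if head == len(arr):
--         return -1
--     else:
--         return head
-- ===== SOURCE B (Python) =====
-- def binary_search3(arr):
--     def rec(lo, n):
--         # search within arr[lo : lo + n], returning the first index holding 1,
--         # or lo + n if the probed region never shows one
--         if n == 0: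
--             return lo
--         half = n // 2
--         if arr[lo + half] == 1:
--             return rec(lo, half)
--         return rec(lo + half + 1, n - half - 1)
--
--     pos = rec(0, len(arr))
--     return pos if pos != len(arr) else -1
-- ===== Notes on version B (the rewrite author's own statement) =====
-- stated objective: alternative
-- what changed: Replaces A's iterative while-loop mutating (head, tail) two-pointer state with a recursive divide-and-conquer helper rec(lo, n) parametrized by segment offset and length, plus a sentinel check on the returned position.
import Mathlib
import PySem

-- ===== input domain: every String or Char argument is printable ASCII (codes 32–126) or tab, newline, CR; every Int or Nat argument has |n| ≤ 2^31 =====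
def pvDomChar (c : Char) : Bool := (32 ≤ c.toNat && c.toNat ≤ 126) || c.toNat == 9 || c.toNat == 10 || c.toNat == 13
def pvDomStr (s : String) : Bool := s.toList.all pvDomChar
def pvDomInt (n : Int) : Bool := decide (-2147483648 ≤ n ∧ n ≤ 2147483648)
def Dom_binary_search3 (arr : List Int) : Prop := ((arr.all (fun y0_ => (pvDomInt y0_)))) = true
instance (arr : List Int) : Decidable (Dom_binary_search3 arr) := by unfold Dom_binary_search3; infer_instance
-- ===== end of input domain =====

-- B replaces A's iterative two-pointer while-loop by a recursive helper over an
-- (offset, segment-length) parametrization; same O(log n) cost (objective: alternative).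


-- ===== PORT A =====
-- A's while-loop over the state (head, tail).  Python's mid = int((head + tail) / 2)
-- is ported as floor division: exact here because head, tail are always ≥ 0 along the
-- loop (head starts at 0, tail at len(arr)), where trunc- and floor-division coincide.
def bs3Loop (arr : List Int) (head tail : Int) : Int :=
  if _h : head < tail then
    let mid := PySem.Int.floordiv (head + tail) 2
    if PySem.List.pyGet? arr mid = some 1 then bs3Loop arr head mid
    else bs3Loop arr (mid + 1) tail
  else head
termination_by (tail - head).toNat
decreasing_by
  · have := PySem.Int.floordiv_eq_ediv_of_pos (a := head + tail) (show (0:Int) < 2 by omega)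
    omega
  · have := PySem.Int.floordiv_eq_ediv_of_pos (a := head + tail) (show (0:Int) < 2 by omega)
    omega

def binary_search3 (arr : List Int) : Int :=
  let head := bs3Loop arr 0 (arr.length : Int)
  if head = (arr.length : Int) then -1 else head

-- ===== PORT B =====
-- B's recursive helper rec(lo, n) over a segment offset and length; both are
-- non-negative throughout in Source B, so they are carried as Nat.
def bs3Rec (arr : List Int) (lo n : Nat) : Int :=
  if n = 0 then (lo : Int)
  else
    let half := n / 2
    if PySem.List.pyGet? arr ((lo + half : Nat) : Int) = some 1 then bs3Rec arr lo half
    else bs3Rec arr (lo + half + 1) (n - half - 1)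
termination_by n
decreasing_by
  · omega
  · omega

def binary_search3_alt (arr : List Int) : Int :=
  let pos := bs3Rec arr 0 arr.length
  if pos ≠ (arr.length : Int) then pos else -1

-- ===== PRECONDITION & SPEC =====
def Spec_binary_search3 (arr : List Int) (out : Int) : Prop := out = binary_search3_alt arr
instance (arr : List Int) (out : Int) : Decidable (Spec_binary_search3 arr out) := by unfold Spec_binary_search3; infer_instance

-- ===== CLAIM (what is proved, stated in full; the proofs are below) =====
def Claim_equal_binary_search3 : Prop := ∀ (arr : List Int), Dom_binary_search3 arr → Spec_binary_search3 arr (binary_search3 arr)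

-- ===== LEMMAS AND PROOFS =====
-- The loop on (head, tail) equals the recursion on (head, tail - head).
theorem bs3Loop_eq_bs3Rec (arr : List Int) :
    ∀ (k h t : Nat), t - h = k → h ≤ t → bs3Loop arr (h : Int) (t : Int) = bs3Rec arr h k := by
  intro k
  induction k using Nat.strong_induction_on with
  | _ k ih =>
    intro h t hk hle
    unfold bs3Loop bs3Rec
    by_cases hlt : (h : Int) < (t : Int)
    · have hkpos : k ≠ 0 := by omega
      have hmid : PySem.Int.floordiv ((h : Int) + (t : Int)) 2 = ((h + k / 2 : Nat) : Int) := by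
        have h1 : ((h : Int) + (t : Int)) = ((h + t : Nat) : Int) := by push_cast; ring
        have h2 : (h + t) / 2 = h + k / 2 := by omega
        have h3 := PySem.Int.floordiv_natCast (h + t) 2
        rw [h2] at h3
        rw [h1]
        exact_mod_cast h3
      simp only [hlt, dif_pos, hkpos, hmid, if_neg, not_false_iff]
      by_cases hone : PySem.List.pyGet? arr ((h + k / 2 : Nat) : Int) = some 1
      · simp only [hone, if_pos]
        exact ih (k / 2) (by omega) h (h + k / 2) (by omega) (by omega)
      · simp only [hone, if_neg, not_false_iff]
        have hcast : ((h + k / 2 : Nat) : Int) + 1 = ((h + k / 2 + 1 : Nat) : Int) := by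
          push_cast; ring
        rw [hcast]
        exact ih (k - k / 2 - 1) (by omega) (h + k / 2 + 1) t (by omega) (by omega)
    · have hk0 : k = 0 := by omega
      have heq : h = t := by omega
      simp [hk0, heq]

-- ===== VERDICT (by name: the statement is the Claim_ definition above) =====
theorem binary_search3_spec : Claim_equal_binary_search3 := by
  intro arr _
  unfold Spec_binary_search3 binary_search3 binary_search3_alt
  have h := bs3Loop_eq_bs3Rec arr arr.length 0 arr.length (by omega) (by omega)
  simp only [Nat.cast_zero] at h
  rw [h]
  by_cases hc : bs3Rec arr 0 arr.length = (arr.length : Int) <;> simp [hc]
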